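-- pv_equiv track=rewrite | github.com/SimCini/python | Ciniltani_BRilevazioniPluviometriche.py | pioggiaMax
-- ===== SOURCE A (Python) =====
-- def pioggiaMax(tupla):
--     max=0
--     cittaMax = []
--     mesiMax = []
--     for locazione,dati in tupla:
--         for citta,provincia in locazione:
--             if provincia=="Milano":
--                 for anno,mesi in dati:
--                     for mese,valore in mesi:
--                         if valore>max:
--                             max = valore
--     for locazione,dati in tupla:
--         for citta,provincia in locazione:
--             if provincia=="Milano":
--                 for anno,mesi in dati:
--                     for mese,valore in mesi:
--                         if valore==max:
--                             cittaMax.append(citta)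
--                             mesiMax.append(mese)
--     return(cittaMax,mesiMax)
-- ===== SOURCE B (Python) =====
-- def pioggiaMax(tupla):
--     mx = 0
--     cittaMax = []
--     mesiMax = []
--     for locazione, dati in tupla:
--         for citta, provincia in locazione:
--             if provincia == "Milano":
--                 for anno, mesi in dati:
--                     for mese, valore in mesi:
--                         if valore > mx:
--                             mx = valore
--                             cittaMax = [citta]
--                             mesiMax = [mese]
--                         elif valore == mx:
--                             cittaMax.append(citta)
--                             mesiMax.append(mese)
--     return (cittaMax, mesiMax)
-- ===== Notes on version B (the rewrite author's own statement) =====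
-- stated objective: alternative
-- what changed: Single pass that maintains a running max and the argmax city/month lists, resetting them on a strict increase, instead of A's two separate full nested traversals (one to find the max, one to collect).
import Mathlib
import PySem

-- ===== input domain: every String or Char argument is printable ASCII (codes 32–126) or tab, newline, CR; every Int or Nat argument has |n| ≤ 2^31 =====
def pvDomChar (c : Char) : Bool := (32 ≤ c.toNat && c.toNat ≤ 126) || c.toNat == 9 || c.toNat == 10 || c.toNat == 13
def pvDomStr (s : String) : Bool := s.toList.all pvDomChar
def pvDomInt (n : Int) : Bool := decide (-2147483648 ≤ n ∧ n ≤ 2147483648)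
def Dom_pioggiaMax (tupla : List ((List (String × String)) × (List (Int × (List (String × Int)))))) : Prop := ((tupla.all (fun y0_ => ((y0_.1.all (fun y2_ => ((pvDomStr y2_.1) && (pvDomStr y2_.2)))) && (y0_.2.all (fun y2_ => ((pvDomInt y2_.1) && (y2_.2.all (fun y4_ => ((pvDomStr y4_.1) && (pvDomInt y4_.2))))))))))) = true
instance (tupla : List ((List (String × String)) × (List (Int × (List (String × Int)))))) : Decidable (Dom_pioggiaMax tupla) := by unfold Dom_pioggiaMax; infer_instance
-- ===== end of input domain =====

-- B replaces A's two full nested traversals by one pass keeping a running max and the argmax lists (alternative decomposition, same cost class).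

-- ===== PORT A =====
-- literal port of A: first nested pass computes mx (seeded with 0), second nested pass collects cities/months whose value equals mx
def pioggiaMax (tupla : List ((List (String × String)) × (List (Int × (List (String × Int)))))) : List String × List String :=
  let mx : Int := tupla.foldl (fun mx ld =>
    ld.1.foldl (fun mx cp =>
      if cp.2 = "Milano" then
        ld.2.foldl (fun mx am =>
          am.2.foldl (fun mx mv => if mv.2 > mx then mv.2 else mx) mx) mx
      else mx) mx) 0
  tupla.foldl (fun (p : List String × List String) ld =>
    ld.1.foldl (fun p cp =>
      if cp.2 = "Milano" then
        ld.2.foldl (fun p am =>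
          am.2.foldl (fun p mv =>
            if mv.2 = mx then (p.1 ++ [cp.1], p.2 ++ [mv.1]) else p) p) p
      else p) p) ([], [])

-- ===== PORT B =====
-- literal port of B: one nested pass over the same structure with state (mx, cittaMax, mesiMax); strict increase resets the lists, equality appends
def pioggiaMax_alt (tupla : List ((List (String × String)) × (List (Int × (List (String × Int)))))) : List String × List String :=
  let s : Int × List String × List String := tupla.foldl (fun s ld =>
    ld.1.foldl (fun s cp =>
      if cp.2 = "Milano" then
        ld.2.foldl (fun s am =>
          am.2.foldl (fun s mv =>
            if mv.2 > s.1 then (mv.2, [cp.1], [mv.1])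
            else if mv.2 = s.1 then (s.1, s.2.1 ++ [cp.1], s.2.2 ++ [mv.1])
            else s) s) s
      else s) s) (0, [], [])
  (s.2.1, s.2.2)

-- ===== PRECONDITION & SPEC =====
def Spec_pioggiaMax (tupla : List ((List (String × String)) × (List (Int × (List (String × Int)))))) (out : List String × List String) : Prop := out = pioggiaMax_alt tupla
instance (tupla : List ((List (String × String)) × (List (Int × (List (String × Int)))))) (out : List String × List String) : Decidable (Spec_pioggiaMax tupla out) := by unfold Spec_pioggiaMax; infer_instance

-- ===== CLAIM (what is proved, stated in full; the proofs are below) =====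
def Claim_equal_pioggiaMax : Prop := ∀ (tupla : List ((List (String × String)) × (List (Int × (List (String × Int)))))), Dom_pioggiaMax tupla → Spec_pioggiaMax tupla (pioggiaMax tupla)

-- ===== LEMMAS AND PROOFS =====

-- the (citta, mese, valore) triples of Milano entries, in the nested iteration order both programs share
def pvTriples (tupla : List ((List (String × String)) × (List (Int × (List (String × Int)))))) : List (String × String × Int) :=
  tupla.flatMap (fun ld => ld.1.flatMap (fun cp =>
    if cp.2 = "Milano" then ld.2.flatMap (fun am => am.2.map (fun mv => (cp.1, mv.1, mv.2))) else []))

def pvMax (l : List (String × String × Int)) (m : Int) : Int :=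
  l.foldl (fun m t => if t.2.2 > m then t.2.2 else m) m

-- any nested fold of this loop shape equals the flat fold over pvTriples
lemma nested_eq_flat {S : Type} (f : S → String → String → Int → S)
    (tupla : List ((List (String × String)) × (List (Int × (List (String × Int)))))) (s : S) :
    tupla.foldl (fun s ld =>
      ld.1.foldl (fun s cp =>
        if cp.2 = "Milano" then
          ld.2.foldl (fun s am =>
            am.2.foldl (fun s mv => f s cp.1 mv.1 mv.2) s) s
        else s) s) s
    = (pvTriples tupla).foldl (fun s t => f s t.1 t.2.1 t.2.2) s := by
  unfold pvTriples
  rw [List.foldl_flatMap]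
  congr 1
  funext s ld
  rw [List.foldl_flatMap]
  congr 1
  funext s cp
  split
  · rw [List.foldl_flatMap]
    congr 1
    funext s am
    rw [List.foldl_map]
  · rfl

-- A's first loop, flattened
lemma nestedA_max (tupla : List ((List (String × String)) × (List (Int × (List (String × Int)))))) :
    (tupla.foldl (fun mx ld =>
      ld.1.foldl (fun mx cp =>
        if cp.2 = "Milano" then
          ld.2.foldl (fun mx am =>
            am.2.foldl (fun mx mv => if mv.2 > mx then mv.2 else mx) mx) mx
        else mx) mx) 0)
    = pvMax (pvTriples tupla) 0 :=
  nested_eq_flat (fun m _ _ v => if v > m then v else m) tupla 0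

-- A's second loop, flattened
lemma nestedA_collect (tupla : List ((List (String × String)) × (List (Int × (List (String × Int)))))) (M : Int) :
    (tupla.foldl (fun (p : List String × List String) ld =>
      ld.1.foldl (fun p cp =>
        if cp.2 = "Milano" then
          ld.2.foldl (fun p am =>
            am.2.foldl (fun p mv =>
              if mv.2 = M then (p.1 ++ [cp.1], p.2 ++ [mv.1]) else p) p) p
        else p) p) ([], []))
    = (pvTriples tupla).foldl (fun (p : List String × List String) t =>
        if t.2.2 = M then (p.1 ++ [t.1], p.2 ++ [t.2.1]) else p) ([], []) :=
  nested_eq_flat (fun p c me v => if v = M then (p.1 ++ [c], p.2 ++ [me]) else p) tupla ([], [])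

-- B's single loop, flattened
lemma nestedB (tupla : List ((List (String × String)) × (List (Int × (List (String × Int)))))) :
    (tupla.foldl (fun (s : Int × List String × List String) ld =>
      ld.1.foldl (fun s cp =>
        if cp.2 = "Milano" then
          ld.2.foldl (fun s am =>
            am.2.foldl (fun s mv =>
              if mv.2 > s.1 then (mv.2, [cp.1], [mv.1])
              else if mv.2 = s.1 then (s.1, s.2.1 ++ [cp.1], s.2.2 ++ [mv.1])
              else s) s) s
        else s) s) (0, [], []))
    = (pvTriples tupla).foldl (fun (s : Int × List String × List String) t =>
        if t.2.2 > s.1 then (t.2.2, [t.1], [t.2.1])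
        else if t.2.2 = s.1 then (s.1, s.2.1 ++ [t.1], s.2.2 ++ [t.2.1])
        else s) (0, [], []) :=
  nested_eq_flat (fun s c me v =>
    if v > s.1 then (v, [c], [me])
    else if v = s.1 then (s.1, s.2.1 ++ [c], s.2.2 ++ [me])
    else s) tupla (0, [], [])

lemma le_pvMax (l : List (String × String × Int)) (m : Int) : m ≤ pvMax l m := by
  induction l generalizing m with
  | nil => simp [pvMax]
  | cons a l ih =>
    simp only [pvMax, List.foldl_cons]
    by_cases h : a.2.2 > m
    · rw [if_pos h]; exact le_trans (le_of_lt h) (ih a.2.2)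
    · rw [if_neg h]; exact ih m

lemma collect_eq (l : List (String × String × Int)) (M : Int) (cs ms : List String) :
    l.foldl (fun (p : List String × List String) t =>
        if t.2.2 = M then (p.1 ++ [t.1], p.2 ++ [t.2.1]) else p) (cs, ms)
    = (cs ++ (l.filter (fun t => t.2.2 = M)).map (fun t => t.1),
       ms ++ (l.filter (fun t => t.2.2 = M)).map (fun t => t.2.1)) := by
  induction l generalizing cs ms with
  | nil => simp
  | cons a l ih =>
    by_cases h : a.2.2 = M <;>
      simp [List.foldl_cons, h, ih]

set_option maxRecDepth 4096 in
lemma onepass_eq (l : List (String × String × Int)) (m : Int) (cs ms : List String) :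
    l.foldl (fun (s : Int × List String × List String) t =>
        if t.2.2 > s.1 then (t.2.2, [t.1], [t.2.1])
        else if t.2.2 = s.1 then (s.1, s.2.1 ++ [t.1], s.2.2 ++ [t.2.1])
        else s) (m, cs, ms)
    = (pvMax l m,
       (if m = pvMax l m then cs else []) ++ (l.filter (fun t => t.2.2 = pvMax l m)).map (fun t => t.1),
       (if m = pvMax l m then ms else []) ++ (l.filter (fun t => t.2.2 = pvMax l m)).map (fun t => t.2.1)) := by
  induction l generalizing m cs ms with
  | nil => simp [pvMax]
  | cons a l ih =>
    have hM : pvMax (a :: l) m = pvMax l (if a.2.2 > m then a.2.2 else m) := by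
      simp [pvMax, List.foldl_cons]
    rcases lt_trichotomy m a.2.2 with h | h | h
    · -- strict increase: reset
      have hgt : a.2.2 > m := h
      have hMv : pvMax (a :: l) m = pvMax l a.2.2 := by rw [hM, if_pos hgt]
      have hne : ¬ m = pvMax l a.2.2 := by
        have := le_pvMax l a.2.2
        omega
      simp only [List.foldl_cons, if_pos hgt, ih, hMv]
      by_cases ha : a.2.2 = pvMax l a.2.2
      · have hne2 : ¬ m = a.2.2 := by omega
        simp [← ha, hne2]
      · simp [ha, hne]
    · -- equal: append
      have hngt : ¬ a.2.2 > m := by omega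
      have heq : a.2.2 = m := h.symm
      have hMv : pvMax (a :: l) m = pvMax l m := by rw [hM, if_neg hngt]
      simp only [List.foldl_cons, if_neg hngt, if_pos heq, ih, hMv]
      by_cases hm : m = pvMax l m
      · simp [← hm, heq]
      · have ha : ¬ a.2.2 = pvMax l m := by omega
        simp [hm, ha]
    · -- smaller: skip
      have hngt : ¬ a.2.2 > m := by omega
      have hneq : ¬ a.2.2 = m := by omega
      have hMv : pvMax (a :: l) m = pvMax l m := by rw [hM, if_neg hngt]
      have ha : ¬ a.2.2 = pvMax l m := by
        have := le_pvMax l m; omega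
      simp only [List.foldl_cons, if_neg hngt, if_neg hneq, ih, hMv]
      simp [ha]

lemma pioggiaMax_eq (tupla : List ((List (String × String)) × (List (Int × (List (String × Int)))))) :
    pioggiaMax tupla
    = (((pvTriples tupla).filter (fun t => t.2.2 = pvMax (pvTriples tupla) 0)).map (fun t => t.1),
       ((pvTriples tupla).filter (fun t => t.2.2 = pvMax (pvTriples tupla) 0)).map (fun t => t.2.1)) := by
  simp only [pioggiaMax]
  rw [nestedA_max, nestedA_collect, collect_eq]
  simp

lemma pioggiaMax_alt_eq (tupla : List ((List (String × String)) × (List (Int × (List (String × Int)))))) :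
    pioggiaMax_alt tupla
    = (((pvTriples tupla).filter (fun t => t.2.2 = pvMax (pvTriples tupla) 0)).map (fun t => t.1),
       ((pvTriples tupla).filter (fun t => t.2.2 = pvMax (pvTriples tupla) 0)).map (fun t => t.2.1)) := by
  simp only [pioggiaMax_alt]
  rw [nestedB, onepass_eq]
  simp

-- ===== VERDICT (by name: the statement is the Claim_ definition above) =====
theorem pioggiaMax_spec : Claim_equal_pioggiaMax := by
  intro tupla _
  unfold Spec_pioggiaMax
  rw [pioggiaMax_eq, pioggiaMax_alt_eq]
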